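-- pv_equiv track=rewrite | github.com/Halmuhammet/Matrix-Based-Decryption-Multiprocessing | multiprocessing.py | process_matrix
-- ===== SOURCE A (Python) =====
-- prime = set([2, 3, 5, 7, 11, 13])
--
-- even = set([0, 2, 4, 6, 8, 10, 12, 14, 16])
--
-- def update_current_cell(current_number, sum_neighbor):
--     if current_number == 0:
--         if sum_neighbor in prime:
--             return 0
--         elif sum_neighbor in even:
--             return 1
--         else:
--             return 2
--     elif current_number == 1:
--         if sum_neighbor in prime:
--             return 1
--         elif sum_neighbor in even:
--             return 2
--         else:
--             return 0
--     else:  # case for current_number = 2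
--         if sum_neighbor in prime:
--             return 2
--         elif sum_neighbor in even:
--             return 0
--         else:
--             return 1
--
-- def process_matrix(matrixData):
--     # unpack the matrixData
--     prev_matrix = matrixData[0]
--     start_row = matrixData[1]
--     end_row = matrixData[2]
--     del (matrixData)  # clear it out of memory.
--
--     # initialize updated rows to however many rows each process needs to work on
--     updated_rows = [[0 for i in range(len(prev_matrix[0]))] for j in range(start_row, end_row)]
--     mtxLength = len(prev_matrix[0])
--
--     # while loop is used for 100 iterations of cell modification
--     for row in range(start_row, end_row):
--         # ensure that the index for updated rows is not out of bound
--         updated_row_index = row - start_row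
--         for column in range(mtxLength):
--             # depending on current cell number, get its neighbor sum and update the current cell depending on that value
--             # top left corner
--             if row == 0 and column == 0:
--                 sum_neighbor = prev_matrix[row+1][column] + prev_matrix[row+1][column+1] + prev_matrix[row][column + 1]
--                 updated_rows[updated_row_index][column] = update_current_cell(prev_matrix[row][column], sum_neighbor)
--
--             # bottom left corner
--             elif row == mtxLength - 1 and column == 0:
--                 sum_neighbor = prev_matrix[row - 1][column] + prev_matrix[row - 1][column + 1] + prev_matrix[row][column + 1]
--                 updated_rows[updated_row_index][column] = update_current_cell(prev_matrix[row][column], sum_neighbor)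
--
--             # top right corner
--             elif row == 0 and column == mtxLength - 1:
--                 sum_neighbor = prev_matrix[row][column - 1] + prev_matrix[row + 1][column - 1] + prev_matrix[row + 1][column]
--                 updated_rows[updated_row_index][column] = update_current_cell(prev_matrix[row][column], sum_neighbor)
--
--             # bottom right corner
--             elif row == mtxLength - 1 and column == mtxLength - 1:
--                 sum_neighbor = prev_matrix[row - 1][column] + prev_matrix[row - 1][column - 1] + prev_matrix[row][column - 1]
--                 updated_rows[updated_row_index][column] = update_current_cell(prev_matrix[row][column], sum_neighbor)
--
--             # top middle edge
--             elif row == 0 and (column != 0 and (column != mtxLength - 1)):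
--                 sum_neighbor = (prev_matrix[row][column - 1] + prev_matrix[row][column + 1] + prev_matrix[row + 1][column]
--                                 + prev_matrix[row + 1][column - 1] + prev_matrix[row + 1][column + 1])
--                 updated_rows[updated_row_index][column] = update_current_cell(prev_matrix[row][column], sum_neighbor)
--
--             # bottom middle edge
--             elif row == mtxLength - 1 and (column != 0 and (column != mtxLength - 1)):
--                 sum_neighbor = (prev_matrix[row][column - 1] + prev_matrix[row][column + 1] + prev_matrix[row - 1][column]
--                                 + prev_matrix[row - 1][column - 1] + prev_matrix[row - 1][column + 1])
--                 updated_rows[updated_row_index][column] = update_current_cell(prev_matrix[row][column], sum_neighbor)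
--
--             # left middle edge
--             elif (row != 0 and (row != mtxLength - 1)) and column == 0:
--                 sum_neighbor = (prev_matrix[row - 1][column] + prev_matrix[row + 1][column] + prev_matrix[row][column + 1]
--                                 + prev_matrix[row - 1][column + 1] + prev_matrix[row + 1][column + 1])
--                 updated_rows[updated_row_index][column] = update_current_cell(prev_matrix[row][column], sum_neighbor)
--
--             # right middle edge
--             elif (row != 0 and (row != mtxLength - 1)) and column == mtxLength - 1:
--                 sum_neighbor = (prev_matrix[row - 1][column] + prev_matrix[row + 1][column] + prev_matrix[row][column - 1]
--                                 + prev_matrix[row - 1][column - 1] + prev_matrix[row + 1][column - 1])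
--                 updated_rows[updated_row_index][column] = update_current_cell(prev_matrix[row][column], sum_neighbor)
--
--             # everywhere else; inside of matrix, not the edges
--             else:
--                 sum_neighbor = (prev_matrix[row - 1][column] + prev_matrix[row + 1][column] + prev_matrix[row - 1][column - 1]
--                                 + prev_matrix[row - 1][column + 1] + prev_matrix[row + 1][column - 1] + prev_matrix[row + 1][column + 1]
--                                 + prev_matrix[row][column - 1] + prev_matrix[row][column + 1])
--                 updated_rows[updated_row_index][column] = update_current_cell(prev_matrix[row][column], sum_neighbor)
--
--     # return the updated rows
--     return updated_rows
-- ===== SOURCE B (Python) =====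
-- prime = set([2, 3, 5, 7, 11, 13])
--
-- even = set([0, 2, 4, 6, 8, 10, 12, 14, 16])
--
-- def neighbor_sum(prev_matrix, n, row, column):
--     # sum of the in-bounds neighbors, bound n on both coordinates
--     s = 0
--     for dr in (-1, 0, 1):
--         for dc in (-1, 0, 1):
--             if dr == 0 and dc == 0:
--                 continue
--             r, c = row + dr, column + dc
--             if 0 <= r < n and 0 <= c < n:
--                 s += prev_matrix[r][c]
--     return s
--
-- def new_value(current, s):
--     shift = 0 if s in prime else (1 if s in even else 2)
--     base = current if current == 0 or current == 1 else 2
--     return (base + shift) % 3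
--
-- def process_matrix(matrixData):
--     prev_matrix, start_row, end_row = matrixData
--     n = len(prev_matrix[0])
--     return [[new_value(prev_matrix[r][c], neighbor_sum(prev_matrix, n, r, c))
--              for c in range(n)]
--             for r in range(start_row, end_row)]
-- ===== Notes on version B (the rewrite author's own statement) =====
-- stated objective: simpler
-- what changed: Replaces A's nine-way corner/edge/interior if-elif chain with one generic bounds-checked loop over the 8 neighbour offsets, replaces the 9-branch update table with the closed form (base + shift) % 3, and builds the result by comprehension instead of mutating a preallocated zero matrix.
-- outside the precondition, e.g. on process_matrix(([[0, 1], [1, 0]], -1, 1)): A returns [[1, 0], [0, 0]], B returns [[0, 2], [0, 0]]; on process_matrix(([[0, 1], [1, 0, 5]], 0, 2)): A returns [[0, 0], [0, 0]], B returns [[0, 0], [0, 0]]; on process_matrix(([[0, 1]], 0, 1)): A raises IndexError, B raises IndexError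
import Mathlib
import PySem

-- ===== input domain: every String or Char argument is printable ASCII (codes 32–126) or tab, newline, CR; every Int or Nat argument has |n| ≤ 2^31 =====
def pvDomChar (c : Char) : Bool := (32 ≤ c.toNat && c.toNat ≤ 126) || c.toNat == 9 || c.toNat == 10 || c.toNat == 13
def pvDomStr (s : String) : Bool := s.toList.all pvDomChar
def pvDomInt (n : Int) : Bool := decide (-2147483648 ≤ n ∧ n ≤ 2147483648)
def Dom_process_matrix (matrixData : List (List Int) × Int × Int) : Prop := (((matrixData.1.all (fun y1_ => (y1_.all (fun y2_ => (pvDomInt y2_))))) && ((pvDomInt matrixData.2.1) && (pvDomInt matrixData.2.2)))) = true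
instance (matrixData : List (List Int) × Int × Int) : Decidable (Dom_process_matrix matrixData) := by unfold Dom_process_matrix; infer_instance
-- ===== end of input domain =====

-- B replaces A's nine-way corner/edge/interior branch chain by one bounds-checked loop over the
-- 8 neighbour offsets and the 9-branch update table by a closed form, for simplicity (same cost).

-- ===== PORT A =====
def pvPrime : PySem.Set Int := PySem.Set.ofList [2, 3, 5, 7, 11, 13]
def pvEven : PySem.Set Int := PySem.Set.ofList [0, 2, 4, 6, 8, 10, 12, 14, 16]

-- matrix cell access m[r][c]; all indices are in range under Pre_ (exact there)
def get2 (P : List (List Int)) (r c : Int) : Int :=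
  PySem.List.pyGetD (PySem.List.pyGetD P r []) c 0

def update_current_cell (current_number sum_neighbor : Int) : Int :=
  if current_number = 0 then
    (if PySem.Set.contains pvPrime sum_neighbor then 0
     else if PySem.Set.contains pvEven sum_neighbor then 1
     else 2)
  else if current_number = 1 then
    (if PySem.Set.contains pvPrime sum_neighbor then 1
     else if PySem.Set.contains pvEven sum_neighbor then 2
     else 0)
  else
    (if PySem.Set.contains pvPrime sum_neighbor then 2
     else if PySem.Set.contains pvEven sum_neighbor then 0
     else 1)

-- body of A's inner loop: the if-elif chain picking the neighbour sum
def aCell (P : List (List Int)) (n row column : Int) : Int :=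
  if row = 0 ∧ column = 0 then
    update_current_cell (get2 P row column)
      (get2 P (row+1) column + get2 P (row+1) (column+1) + get2 P row (column+1))
  else if row = n - 1 ∧ column = 0 then
    update_current_cell (get2 P row column)
      (get2 P (row-1) column + get2 P (row-1) (column+1) + get2 P row (column+1))
  else if row = 0 ∧ column = n - 1 then
    update_current_cell (get2 P row column)
      (get2 P row (column-1) + get2 P (row+1) (column-1) + get2 P (row+1) column)
  else if row = n - 1 ∧ column = n - 1 then
    update_current_cell (get2 P row column)
      (get2 P (row-1) column + get2 P (row-1) (column-1) + get2 P row (column-1))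
  else if row = 0 ∧ (column ≠ 0 ∧ column ≠ n - 1) then
    update_current_cell (get2 P row column)
      (get2 P row (column-1) + get2 P row (column+1) + get2 P (row+1) column
        + get2 P (row+1) (column-1) + get2 P (row+1) (column+1))
  else if row = n - 1 ∧ (column ≠ 0 ∧ column ≠ n - 1) then
    update_current_cell (get2 P row column)
      (get2 P row (column-1) + get2 P row (column+1) + get2 P (row-1) column
        + get2 P (row-1) (column-1) + get2 P (row-1) (column+1))
  else if (row ≠ 0 ∧ row ≠ n - 1) ∧ column = 0 then
    update_current_cell (get2 P row column)
      (get2 P (row-1) column + get2 P (row+1) column + get2 P row (column+1)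
        + get2 P (row-1) (column+1) + get2 P (row+1) (column+1))
  else if (row ≠ 0 ∧ row ≠ n - 1) ∧ column = n - 1 then
    update_current_cell (get2 P row column)
      (get2 P (row-1) column + get2 P (row+1) column + get2 P row (column-1)
        + get2 P (row-1) (column-1) + get2 P (row+1) (column-1))
  else
    update_current_cell (get2 P row column)
      (get2 P (row-1) column + get2 P (row+1) column + get2 P (row-1) (column-1)
        + get2 P (row-1) (column+1) + get2 P (row+1) (column-1) + get2 P (row+1) (column+1)
        + get2 P row (column-1) + get2 P row (column+1))

def process_matrix (matrixData : List (List Int) × Int × Int) : List (List Int) :=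
  let prev_matrix := matrixData.1
  let start_row := matrixData.2.1
  let end_row := matrixData.2.2
  -- updated_rows initialised to zeros, then mutated cell by cell (pySetD = Python item assignment; in range under Pre_)
  let updated_rows : List (List Int) :=
    (PySem.List.pyRange start_row end_row 1).map (fun _ =>
      (PySem.List.pyRange 0 (PySem.List.len (PySem.List.pyGetD prev_matrix 0 [])) 1).map (fun _ => (0:Int)))
  let mtxLength : Int := PySem.List.len (PySem.List.pyGetD prev_matrix 0 [])
  (PySem.List.pyRange start_row end_row 1).foldl (fun U row =>
    let updated_row_index := row - start_row
    (PySem.List.pyRange 0 mtxLength 1).foldl (fun U column =>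
      PySem.List.pySetD U updated_row_index
        (PySem.List.pySetD (PySem.List.pyGetD U updated_row_index []) column
          (aCell prev_matrix mtxLength row column))) U) updated_rows

-- ===== PORT B =====
def neighborSum (P : List (List Int)) (n row column : Int) : Int :=
  ([-1, 0, 1] : List Int).foldl (fun s dr =>
    ([-1, 0, 1] : List Int).foldl (fun s dc =>
      if dr = 0 ∧ dc = 0 then s
      else
        let r := row + dr
        let c := column + dc
        if 0 ≤ r ∧ r < n ∧ 0 ≤ c ∧ c < n then s + get2 P r c else s) s) 0

def newValue (current s : Int) : Int :=
  let shift : Int :=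
    if PySem.Set.contains pvPrime s then 0
    else if PySem.Set.contains pvEven s then 1
    else 2
  let base : Int := if current = 0 ∨ current = 1 then current else 2
  PySem.Int.mod (base + shift) 3

def process_matrix_alt (matrixData : List (List Int) × Int × Int) : List (List Int) :=
  let prev_matrix := matrixData.1
  let start_row := matrixData.2.1
  let end_row := matrixData.2.2
  let n : Int := PySem.List.len (PySem.List.pyGetD prev_matrix 0 [])
  (PySem.List.pyRange start_row end_row 1).map (fun r =>
    (PySem.List.pyRange 0 n 1).map (fun c =>
      newValue (get2 prev_matrix r c) (neighborSum prev_matrix n r c)))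

-- ===== PRECONDITION & SPEC =====
-- Pre_ is the function's natural domain: a non-empty matrix with either an empty row range
-- (end_row ≤ start_row: A returns []) or a square matrix of size n ≥ 2 and 0 ≤ start_row ≤ end_row ≤ n.
-- Excluded inputs on which A still returns: negative start_row (A's values come from Python's
-- negative-index wraparound, an accident of the implementation) and ragged rows longer than row 0
-- (A accidentally ignores the extra columns; B agrees there).
def Pre_process_matrix (matrixData : List (List Int) × Int × Int) : Prop :=
  matrixData.1 ≠ [] ∧
    (matrixData.2.2 ≤ matrixData.2.1 ∨
      (0 ≤ matrixData.2.1 ∧ matrixData.2.1 ≤ matrixData.2.2 ∧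
       matrixData.2.2 ≤ (matrixData.1.length : Int) ∧
       2 ≤ (matrixData.1.headD []).length ∧
       matrixData.1.length = (matrixData.1.headD []).length ∧
       ∀ r ∈ matrixData.1, r.length = (matrixData.1.headD []).length))
instance (matrixData : List (List Int) × Int × Int) : Decidable (Pre_process_matrix matrixData) := by
  unfold Pre_process_matrix; infer_instance

def pvWitness_process_matrix : (List (List Int) × Int × Int) := ([[0, 1], [1, 2]], 0, 2)

def Spec_process_matrix (matrixData : List (List Int) × Int × Int) (out : List (List Int)) : Prop := out = process_matrix_alt matrixData
instance (matrixData : List (List Int) × Int × Int) (out : List (List Int)) : Decidable (Spec_process_matrix matrixData out) := by unfold Spec_process_matrix; infer_instance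

-- ===== CLAIM (what is proved, stated in full; the proofs are below) =====
def Claim_equal_process_matrix : Prop := ∀ (matrixData : List (List Int) × Int × Int), Dom_process_matrix matrixData → Pre_process_matrix matrixData → Spec_process_matrix matrixData (process_matrix matrixData)

-- ===== LEMMAS AND PROOFS =====

-- the branch table and the closed form agree for every current value and neighbour sum
theorem ucc_eq_newValue (c s : Int) : update_current_cell c s = newValue c s := by
  unfold update_current_cell newValue
  by_cases hc0 : c = 0 <;> by_cases hc1 : c = 1 <;>
    cases h1 : PySem.Set.contains pvPrime s <;>
      cases h2 : PySem.Set.contains pvEven s <;>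
        simp [hc0, hc1, h1, h2] <;> decide

-- A's branch chain equals B's bounds-checked offset sum at every in-range cell of an n×n grid, n ≥ 2
set_option maxHeartbeats 4000000 in
theorem cell_eq (P : List (List Int)) (n row column : Int)
    (hn : 2 ≤ n) (hr0 : 0 ≤ row) (hrn : row < n) (hc0 : 0 ≤ column) (hcn : column < n) :
    aCell P n row column = newValue (get2 P row column) (neighborSum P n row column) := by
  have hstep : ∀ (p : Prop) (_ : Decidable p) (s x : Int),
      (if p then s + x else s) = s + (if p then x else 0) := by
    intro p _ s x; split <;> simp
  unfold aCell neighborSum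
  simp only [List.foldl_cons, List.foldl_nil, Int.reduceEq, and_true, and_false, reduceIte,
    add_zero, zero_add, hstep, ucc_eq_newValue]
  split_ifs <;> first
    | (exfalso; omega)
    | rfl
    | exact congrArg _ (by ring)

-- a fold over range m whose body rewrites position j from its current content leaves
-- positions < j final and positions ≥ j untouched
theorem fold_body_generic {α : Type} (d : α) (G : Nat → α → α) (Phi : Nat → List α → List α)
    (hPhi : ∀ (j : Nat) (U : List α), j < U.length → Phi j U = U.set j (G j (U.getD j d))) :
    ∀ (m : Nat) (ys : List α), m ≤ ys.length →
      (List.range m).foldl (fun acc j => Phi j acc) ys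
        = (List.range m).map (fun j => G j (ys.getD j d)) ++ ys.drop m := by
  intro m
  induction m with
  | zero => intro ys _; simp
  | succ m ih =>
      intro ys hm
      rw [List.range_succ, List.foldl_append, List.map_append, ih ys (by omega)]
      simp only [List.foldl_cons, List.foldl_nil, List.map_cons, List.map_nil]
      have hlen : ((List.range m).map (fun j => G j (ys.getD j d))).length = m := by simp
      have hmlt : m < ys.length := by omega
      have hdrop : ys.drop m = ys[m] :: ys.drop (m + 1) := List.drop_eq_getElem_cons hmlt
      rw [hPhi m _ (by simp [hlen]; omega)]
      have hgetD : ((List.range m).map (fun j => G j (ys.getD j d)) ++ ys.drop m).getD m d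
          = ys[m] := by
        rw [List.getD, List.getElem?_append_right (by omega), hlen, Nat.sub_self, hdrop]
        simp [List.getElem?_eq_getElem hmlt]
      have hysm : ys.getD m d = ys[m] := by
        rw [List.getD, List.getElem?_eq_getElem hmlt]; rfl
      rw [hgetD, List.set_append, hlen, if_neg (by omega), Nat.sub_self, hdrop, hysm]
      simp
      rw [hdrop]
      rfl

-- writing every position of a row of the right length writes the whole row
theorem fold_set_row (f : Int -> Int) (N : Nat) (ys : List Int) (h : ys.length = N) :
    (List.range N).foldl (fun acc j => acc.set j (f (j : Int))) ys
      = (List.range N).map (fun (j : Nat) => f (j : Int)) := by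
  have h2 := fold_body_generic (0 : Int) (fun j _ => f (j : Int))
    (fun j U => U.set j (f (j : Int))) (fun _ _ _ => rfl) N ys (by omega)
  have hd : ys.drop N = [] := by rw [← h]; exact List.drop_length
  exact h2.trans (by rw [hd, List.append_nil])

-- A's in-place writes through U[i][c] commute with first building the whole row i
theorem inner_comm (f : Int -> Int) (L : List Int) :
    ∀ (U : List (List Int)) (j : Nat), j < U.length →
      L.foldl (fun V c =>
          PySem.List.pySetD V (j : Int)
            (PySem.List.pySetD (PySem.List.pyGetD V (j : Int) []) c (f c))) U
        = U.set j (L.foldl (fun r c => PySem.List.pySetD r c (f c)) (U.getD j [])) := by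
  induction L with
  | nil =>
      intro U j h
      simp only [List.foldl_nil]
      rw [List.getD, List.getElem?_eq_getElem h, Option.getD_some, List.set_getElem_self]
  | cons c L ih =>
      intro U j h
      simp only [List.foldl_cons]
      rw [ih (PySem.List.pySetD U (j : Int)
              (PySem.List.pySetD (PySem.List.pyGetD U (j : Int) []) c (f c))) j
            (by simpa using h)]
      simp only [PySem.List.pySetD_natCast, PySem.List.pyGetD_natCast]
      rw [List.set_set]
      have hget : ((U.set j (PySem.List.pySetD (U.getD j []) c (f c))).getD j [])
          = PySem.List.pySetD (U.getD j []) c (f c) := by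
        rw [List.getD, List.getElem?_set_self h]; rfl
      rw [hget]

theorem head_getD (P : List (List Int)) (hP : P ≠ []) :
    PySem.List.pyGetD P 0 [] = P.headD [] := by
  cases P with
  | nil => cases hP rfl
  | cons a t => rw [PySem.List.pyGetD_zero_cons]; rfl

-- B's port is row-by-row, cell-by-cell evaluation over Nat ranges
theorem B_eq (P : List (List Int)) (s e : Int) (hP : P ≠ []) :
    process_matrix_alt (P, s, e)
      = (List.range (e - s).toNat).map (fun (k : Nat) =>
          (List.range (P.headD []).length).map (fun (j : Nat) =>
            newValue (get2 P (s + (k : Int)) (j : Int))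
              (neighborSum P ((P.headD []).length : Int) (s + (k : Int)) (j : Int)))) := by
  simp only [process_matrix_alt, head_getD P hP, PySem.List.len_eq]
  rw [PySem.List.pyRange_one s e, PySem.List.pyRange_one 0 ((P.headD []).length : Int)]
  simp only [Int.sub_zero, Int.toNat_natCast, zero_add, List.map_map, Function.comp_def]

-- A's fold of in-place writes equals the same row-by-row, cell-by-cell evaluation
theorem A_eq (P : List (List Int)) (s e : Int) (hP : P ≠ []) :
    process_matrix (P, s, e)
      = (List.range (e - s).toNat).map (fun (k : Nat) =>
          (List.range (P.headD []).length).map (fun (j : Nat) =>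
            aCell P ((P.headD []).length : Int) (s + (k : Int)) (j : Int))) := by
  simp only [process_matrix, head_getD P hP, PySem.List.len_eq]
  rw [PySem.List.pyRange_one s e, PySem.List.pyRange_one 0 ((P.headD []).length : Int)]
  simp only [Int.sub_zero, Int.toNat_natCast, zero_add, List.map_map, Function.comp_def]
  rw [List.foldl_map]
  simp only [add_sub_cancel_left]
  rw [fold_body_generic ([] : List Int)
        (fun k r => ((List.range (P.headD []).length).map (fun (j : Nat) => (j : Int))).foldl
            (fun r c => PySem.List.pySetD r c
              (aCell P ((P.headD []).length : Int) (s + (k : Int)) c)) r)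
        (fun k U => ((List.range (P.headD []).length).map (fun (j : Nat) => (j : Int))).foldl
            (fun U column => PySem.List.pySetD U (k : Int)
              (PySem.List.pySetD (PySem.List.pyGetD U (k : Int) []) column
                (aCell P ((P.headD []).length : Int) (s + (k : Int)) column))) U)
        (fun j U hj => inner_comm _ _ U j hj)
        (e - s).toNat _ (by simp)]
  have hdrop : (((List.range (e - s).toNat).map
      (fun _ => (List.range (P.headD []).length).map (fun _ => (0 : Int)))).drop
        (e - s).toNat) = [] := by
    apply List.drop_eq_nil_of_le; simp
  rw [hdrop, List.append_nil]
  apply List.map_congr_left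
  intro k hk
  have hk' : k < (e - s).toNat := List.mem_range.mp hk
  have hgd : (((List.range (e - s).toNat).map
      (fun _ => (List.range (P.headD []).length).map (fun _ => (0 : Int)))).getD k [])
        = (List.range (P.headD []).length).map (fun _ => (0 : Int)) := by
    rw [List.getD, List.getElem?_map, List.getElem?_range hk']
    rfl
  rw [hgd, List.foldl_map]
  simp only [PySem.List.pySetD_natCast]
  exact fold_set_row (fun c => aCell P ((P.headD []).length : Int) (s + (k : Int)) c)
    (P.headD []).length _ (by simp)

-- ===== VERDICT (by name: the statement is the Claim_ definition above) =====
theorem process_matrix_spec : Claim_equal_process_matrix := by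
  intro md _ hpre
  obtain ⟨P, s, e⟩ := md
  unfold Spec_process_matrix
  dsimp only [Pre_process_matrix] at hpre
  obtain ⟨hP, hrest⟩ := hpre
  rcases hrest with htriv | hmain
  · simp only [process_matrix, process_matrix_alt]
    rw [PySem.List.pyRange_one_eq_nil htriv]
    simp
  · obtain ⟨hs, hse, heP, hN2, hsq, _⟩ := hmain
    rw [A_eq P s e hP, B_eq P s e hP]
    apply List.map_congr_left
    intro k hk
    have hk' : k < (e - s).toNat := List.mem_range.mp hk
    apply List.map_congr_left
    intro j hj
    have hj' : j < (P.headD []).length := List.mem_range.mp hj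
    exact cell_eq P ((P.headD []).length : Int) (s + (k : Int)) (j : Int)
      (by omega) (by omega) (by omega) (by omega) (by omega)
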